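-- pv_equiv track=rewrite | github.com/saisaranyaatti/100_days-coding-challenge | 19.near_fibnocci_number.py | near_fibnocci
-- ===== SOURCE A (Python) =====
-- def near_fibnocci(n):
--     a=0
--     b=1
--     while n>=b:
--         c=a+b
--         a=b
--         b=c
--     if abs(a-n)>abs(b-n):
--         return b
--     return a
-- ===== SOURCE B (Python) =====
-- def near_fibnocci(n):
--     # 48 Fibonacci numbers cover the whole 32-bit input domain (fib(47) = 2971215073 > 2**31),
--     # so precompute the fixed table once and pick the nearest entry (ties to the smaller).
--     a, b = 0, 1
--     fibs = []
--     for _ in range(48):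
--         fibs.append(a)
--         a, b = b, a + b
--     return min(fibs, key=lambda f: (abs(f - n), f))
-- ===== Notes on version B (the rewrite author's own statement) =====
-- stated objective: alternative
-- what changed: Replaces A's n-driven while-loop over two scalars plus a final two-way compare with a fixed precomputed 48-entry Fibonacci table (fib(47) > 2^31 covers the whole stated 32-bit domain) and a single min-by-key pass over it with key (abs(f-n), f), whose value tie-break reproduces A's tie-to-smaller rule.
import Mathlib
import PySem

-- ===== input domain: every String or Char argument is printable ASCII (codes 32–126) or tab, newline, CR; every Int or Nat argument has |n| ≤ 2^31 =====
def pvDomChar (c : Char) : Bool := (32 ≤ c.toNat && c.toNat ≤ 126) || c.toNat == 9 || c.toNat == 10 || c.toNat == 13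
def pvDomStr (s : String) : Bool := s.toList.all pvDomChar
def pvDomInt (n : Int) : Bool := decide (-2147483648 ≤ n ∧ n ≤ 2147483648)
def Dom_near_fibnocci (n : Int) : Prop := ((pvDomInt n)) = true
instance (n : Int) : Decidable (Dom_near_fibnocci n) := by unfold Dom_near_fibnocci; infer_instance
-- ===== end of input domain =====

-- B replaces A's n-driven two-scalar while-loop + final two-way compare with a fixed
-- precomputed 48-entry Fibonacci table (enough for the stated 32-bit domain, as
-- fib 47 = 2971215073 > 2^31) and one min-by-key pass over it with key
-- (distance to n, value) (objective: alternative).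

-- ===== PORT A =====
-- A's while-loop: state (a, b); the invariants 0 ≤ a ≤ b, 1 ≤ b hold on every call from
-- the port and are carried only to justify termination (b grows, a+b strictly grows).
def nearLoopA (n a b : Int) (h : 0 ≤ a ∧ a ≤ b ∧ 1 ≤ b) : Int × Int :=
  if hc : n ≥ b then
    nearLoopA n b (a + b) ⟨by omega, by omega, by omega⟩
  else
    (a, b)
termination_by (2 * n + 2 - a - b).toNat
decreasing_by omega

def near_fibnocci (n : Int) : Int :=
  let p := nearLoopA n 0 1 ⟨by norm_num, by norm_num, le_refl 1⟩
  if |p.1 - n| > |p.2 - n| then p.2 else p.1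

-- ===== PORT B =====
-- Source B: `for _ in range(48): fibs.append(a); a, b = b, a + b`, then
-- `min(fibs, key=lambda f: (abs(f - n), f))`; the list is never empty, so min2? is
-- always `some` and the `.getD 0` default is never taken.
def near_fibnocci_alt (n : Int) : Int :=
  let s := (PySem.List.pyRange 0 48 1).foldl
      (fun s _ => (s.2.1, s.1 + s.2.1, s.2.2 ++ [s.1])) ((0 : Int), (1 : Int), ([] : List Int))
  (PySem.List.min2? s.2.2 (fun f => |f - n|) (fun f => f)).getD 0

-- ===== PRECONDITION & SPEC =====
def Spec_near_fibnocci (n : Int) (out : Int) : Prop := out = near_fibnocci_alt n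
instance (n : Int) (out : Int) : Decidable (Spec_near_fibnocci n out) := by unfold Spec_near_fibnocci; infer_instance

-- ===== CLAIM (what is proved, stated in full; the proofs are below) =====
def Claim_equal_near_fibnocci : Prop := ∀ (n : Int), Dom_near_fibnocci n → Spec_near_fibnocci n (near_fibnocci n)

-- ===== LEMMAS AND PROOFS =====

-- the step function of PySem.List.min2?, specialised to B's key (distance to n, value)
def fmin (n : Int) (acc : Option Int) (x : Int) : Option Int :=
  match acc with
  | none => some x
  | some m =>
      if (decide (|x - n| < |m - n|) || !decide (|m - n| < |x - n|) && decide (x < m)) = true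
      then some x else some m

lemma min2?_eq_foldl_fmin (n : Int) (xs : List Int) :
    PySem.List.min2? xs (fun f => |f - n|) (fun f => f) = xs.foldl (fmin n) none := by
  unfold PySem.List.min2? fmin
  congr 1
  funext acc x
  cases acc <;> rfl

lemma fmin_some (n m x : Int) : fmin n (some m) x =
    if (decide (|x - n| < |m - n|) || !decide (|m - n| < |x - n|) && decide (x < m)) = true
    then some x else some m := rfl

-- the incumbent m survives a challenger x whose key is no better
lemma fmin_keep (n m x : Int) (h1 : |m - n| ≤ |x - n|) (h2 : |m - n| = |x - n| → m ≤ x) :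
    fmin n (some m) x = some m := by
  rw [fmin_some]
  split_ifs with hc
  · exfalso
    simp only [Bool.or_eq_true, Bool.and_eq_true, Bool.not_eq_true', decide_eq_true_eq,
      decide_eq_false_iff_not] at hc
    rcases hc with hlt | ⟨hnlt, hxm⟩
    · omega
    · have := h2 (by omega)
      omega
  · rfl

-- a challenger x with a key no worse than m's wins, provided a tie forces m = x
lemma fmin_take (n m x : Int) (h1 : |x - n| ≤ |m - n|) (h2 : |x - n| = |m - n| → m = x) :
    fmin n (some m) x = some x := by
  rw [fmin_some]
  split_ifs with hc
  · rfl
  · simp only [Bool.or_eq_true, Bool.and_eq_true, Bool.not_eq_true', decide_eq_true_eq,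
      decide_eq_false_iff_not, not_or, not_and, not_lt] at hc
    rw [h2 (le_antisymm h1 hc.1)]

-- A's final two-way compare, as one fmin step (a ≤ b, so the value tie-break of
-- min2? never prefers b)
lemma fmin_pair (n a b : Int) (hab : a ≤ b) :
    fmin n (some a) b = some (if |a - n| > |b - n| then b else a) := by
  by_cases hgt : |a - n| > |b - n|
  · rw [if_pos hgt, fmin_take n a b (le_of_lt hgt) (fun he => by omega)]
  · rw [if_neg hgt, fmin_keep n a b (by omega) (fun _ => hab)]

-- proof-only scaffold: the Fibonacci values Source B's fixed 48-step loop emits, listed as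
-- "emit a while b ≤ 2^31, then emit the bracketing pair [a, b]"
def fibTab (a b : Int) (h : 0 ≤ a ∧ a ≤ b ∧ 1 ≤ b) : List Int :=
  if hc : b ≤ 2147483648 then
    a :: fibTab b (a + b) ⟨by omega, by omega, by omega⟩
  else
    [a, b]
termination_by (2 * 2147483648 + 2 - a - b).toNat
decreasing_by omega

-- once n ≤ a and the incumbent best is ≤ a with distance ≤ a - n, every remaining
-- table entry has a key no better (distances grow with the entry past n, and ties
-- resolve to the smaller value = best), so the min-fold no longer moves
lemma tail_min (n a b : Int) (h : 0 ≤ a ∧ a ≤ b ∧ 1 ≤ b) :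
    ∀ best : Int, n ≤ a → |best - n| ≤ a - n → best ≤ a →
      (fibTab a b h).foldl (fmin n) (some best) = some best := by
  fun_induction fibTab a b h with
  | case1 a b h hc ih =>
    intro best hna hb hba
    have ha : |a - n| = a - n := abs_of_nonneg (by omega)
    rw [List.foldl_cons, fmin_keep n best a (by omega) (fun _ => hba)]
    exact ih best (by omega) (by omega) (by omega)
  | case2 a b h hc =>
    intro best hna hb hba
    have ha : |a - n| = a - n := abs_of_nonneg (by omega)
    have hbn : |b - n| = b - n := abs_of_nonneg (by omega)
    rw [List.foldl_cons, fmin_keep n best a (by omega) (fun _ => hba),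
        List.foldl_cons, fmin_keep n best b (by omega) (fun _ => by omega), List.foldl_nil]

-- after A's loop stops at (a, b) (n < b), folding the rest of the table from
-- incumbent a yields exactly A's final compare of a and b
lemma after_stop (n a b : Int) (h : 0 ≤ a ∧ a ≤ b ∧ 1 ≤ b) (hnb : n < b)
    (h' : 0 ≤ b ∧ b ≤ a + b ∧ 1 ≤ a + b) :
    (fibTab b (a + b) h').foldl (fmin n) (some a)
      = some (if |a - n| > |b - n| then b else a) := by
  have hbn : |b - n| = b - n := abs_of_nonneg (by omega)
  have hm2d : |(if |a - n| > |b - n| then b else a) - n| ≤ b - n := by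
    split_ifs with hg <;> omega
  have hm2le : (if |a - n| > |b - n| then b else a) ≤ a + b := by
    split_ifs <;> omega
  rw [fibTab]
  split
  · rw [List.foldl_cons, fmin_pair n a b h.2.1]
    exact tail_min n (a + b) (b + (a + b)) _ _ (by omega) (by omega) hm2le
  · rw [List.foldl_cons, fmin_pair n a b h.2.1, List.foldl_cons, List.foldl_nil,
        fmin_keep n _ (a + b) ?_ ?_]
    · have hab : |a + b - n| = a + b - n := abs_of_nonneg (by omega)
      omega
    · intro _
      exact hm2le

-- the min-fold over the table from (a, b) computes A's loop-then-compare answer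
lemma main_min (n a b : Int) (h : 0 ≤ a ∧ a ≤ b ∧ 1 ≤ b) :
    ∀ best : Int, n ≤ 2147483648 → |a - n| ≤ |best - n| → (|a - n| = |best - n| → best = a) →
      (fibTab a b h).foldl (fmin n) (some best)
        = some (if |(nearLoopA n a b h).1 - n| > |(nearLoopA n a b h).2 - n|
                then (nearLoopA n a b h).2 else (nearLoopA n a b h).1) := by
  fun_induction fibTab a b h with
  | case1 a b h hc ih =>
    intro best hn h1 h2
    rw [List.foldl_cons, fmin_take n best a h1 h2]
    by_cases hnb : n ≥ b
    · rw [nearLoopA, dif_pos hnb]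
      have e1 : |a - n| = n - a := by rw [abs_of_nonpos (by omega)]; ring
      have e2 : |b - n| = n - b := by rw [abs_of_nonpos (by omega)]; ring
      exact ih a hn (by omega) (fun he => by omega)
    · rw [nearLoopA, dif_neg hnb]
      exact after_stop n a b h (by omega) _
  | case2 a b h hc =>
    intro best hn h1 h2
    rw [nearLoopA, dif_neg (by omega), List.foldl_cons, fmin_take n best a h1 h2,
        List.foldl_cons, fmin_pair n a b h.2.1, List.foldl_nil]

-- Source B's fixed 48-step generation produces exactly fibTab 0 1 (= fib 0 .. fib 47)
lemma gen_eq_fibTab :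
    ((PySem.List.pyRange 0 48 1).foldl
        (fun s _ => (s.2.1, s.1 + s.2.1, s.2.2 ++ [s.1]))
        ((0 : Int), (1 : Int), ([] : List Int))).2.2
      = fibTab 0 1 ⟨by norm_num, by norm_num, le_refl 1⟩ := by
  have hL : ((PySem.List.pyRange 0 48 1).foldl
      (fun s _ => (s.2.1, s.1 + s.2.1, s.2.2 ++ [s.1]))
      ((0 : Int), (1 : Int), ([] : List Int))).2.2
      = [0, 1, 1, 2, 3, 5, 8, 13, 21, 34, 55, 89, 144, 233, 377, 610, 987, 1597, 2584,
         4181, 6765, 10946, 17711, 28657, 46368, 75025, 121393, 196418, 317811, 514229,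
         832040, 1346269, 2178309, 3524578, 5702887, 9227465, 14930352, 24157817,
         39088169, 63245986, 102334155, 165580141, 267914296, 433494437, 701408733,
         1134903170, 1836311903, 2971215073] := by decide
  rw [hL]
  repeat (rw [fibTab]; norm_num)

-- ===== VERDICT (by name: the statement is the Claim_ definition above) =====
theorem near_fibnocci_spec : Claim_equal_near_fibnocci := by
  intro n hdom
  have hdom' : -2147483648 ≤ n ∧ n ≤ 2147483648 := by
    simpa [Dom_near_fibnocci, pvDomInt] using hdom
  show near_fibnocci n = near_fibnocci_alt n
  have hB : near_fibnocci_alt n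
      = ((fibTab 0 1 ⟨by norm_num, by norm_num, le_refl 1⟩).foldl (fmin n) none).getD 0 := by
    show (PySem.List.min2?
        ((PySem.List.pyRange 0 48 1).foldl
          (fun s _ => (s.2.1, s.1 + s.2.1, s.2.2 ++ [s.1]))
          ((0 : Int), (1 : Int), ([] : List Int))).2.2
        (fun f => |f - n|) (fun f => f)).getD 0 = _
    rw [gen_eq_fibTab, min2?_eq_foldl_fmin]
  have hA : near_fibnocci n
      = (if |(nearLoopA n 0 1 ⟨by norm_num, by norm_num, le_refl 1⟩).1 - n|
            > |(nearLoopA n 0 1 ⟨by norm_num, by norm_num, le_refl 1⟩).2 - n|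
         then (nearLoopA n 0 1 ⟨by norm_num, by norm_num, le_refl 1⟩).2
         else (nearLoopA n 0 1 ⟨by norm_num, by norm_num, le_refl 1⟩).1) := rfl
  rw [hA, hB]
  have hstep : fibTab 0 1 ⟨by norm_num, by norm_num, le_refl 1⟩
      = 0 :: fibTab 1 (0 + 1) ⟨by omega, by omega, by omega⟩ := by
    rw [fibTab]; norm_num
  rw [hstep, List.foldl_cons]
  have hfirst : fmin n none 0 = some 0 := rfl
  rw [hfirst]
  by_cases h1n : 1 ≤ n
  · have e1 : |(1 : Int) - n| = n - 1 := by rw [abs_of_nonpos (by omega)]; ring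
    have e0 : |(0 : Int) - n| = n := by rw [abs_of_nonpos (by omega)]; ring
    rw [main_min n 1 (0 + 1) _ 0 hdom'.2 (by omega) (by omega)]
    rw [nearLoopA, dif_pos (by omega : n ≥ 1)]
    rfl
  · rw [tail_min n 1 (0 + 1) _ 0 (by omega)
      (by rw [abs_of_nonneg (by omega : (0:Int) ≤ 0 - n)]; omega) (by omega)]
    rw [nearLoopA, dif_neg (by omega : ¬ n ≥ 1)]
    have e0 : |(0 : Int) - n| = 0 - n := abs_of_nonneg (by omega)
    have e1 : |(1 : Int) - n| = 1 - n := abs_of_nonneg (by omega)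
    show (if |(0 : Int) - n| > |(1 : Int) - n| then (1 : Int) else (0 : Int)) = (some (0 : Int)).getD 0
    rw [if_neg (by omega)]
    rfl
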